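-- pv_equiv track=rewrite | github.com/flexevich/Cryptography | 7 semester/Шифр перестановки/3_laba.py | zapretgram
-- ===== SOURCE A (Python) =====
-- def zapretgram(lett_T, list):
--     res = {}
--     for i in range(len(lett_T)):
--         res[i] = []
--         for j in range(len(lett_T)):
--             if i != j:
--                 for k in range(len(lett_T[0])):
--                     bigram = lett_T[i][k] + lett_T[j][k]
--                     if bigram in list:
--                         res[i].append(j)
--                         break
--
--     return res
-- ===== SOURCE B (Python) =====
-- def zapretgram(lett_T, list):
--     n = len(lett_T)
--     partners = {i: set() for i in range(n)}
--     if n >= 2: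
--         m = len(lett_T[0])
--         forb = {b for b in list if len(b) == 2}
--         for k in range(m):
--             col_index = {}
--             for i in range(n):
--                 col_index.setdefault(lett_T[i][k], []).append(i)
--             for b in forb:
--                 for i in col_index.get(b[0], []):
--                     for j in col_index.get(b[1], []):
--                         if i != j:
--                             partners[i].add(j)
--     return {i: sorted(s) for i, s in partners.items()}
-- ===== Notes on version B (the rewrite author's own statement) =====
-- stated objective: faster
-- what changed: Replaces A's row-pair-column triple loop with a linear membership test over the forbidden list by a per-column char-to-rows index dict plus per-row partner sets (column-major traversal), sorting each partner set at the end.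
-- outside the precondition, e.g. on zapretgram(['bb', 'b'], ['bb']): A returns {0: [1], 1: [0]}, B raises IndexError
import Mathlib
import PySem

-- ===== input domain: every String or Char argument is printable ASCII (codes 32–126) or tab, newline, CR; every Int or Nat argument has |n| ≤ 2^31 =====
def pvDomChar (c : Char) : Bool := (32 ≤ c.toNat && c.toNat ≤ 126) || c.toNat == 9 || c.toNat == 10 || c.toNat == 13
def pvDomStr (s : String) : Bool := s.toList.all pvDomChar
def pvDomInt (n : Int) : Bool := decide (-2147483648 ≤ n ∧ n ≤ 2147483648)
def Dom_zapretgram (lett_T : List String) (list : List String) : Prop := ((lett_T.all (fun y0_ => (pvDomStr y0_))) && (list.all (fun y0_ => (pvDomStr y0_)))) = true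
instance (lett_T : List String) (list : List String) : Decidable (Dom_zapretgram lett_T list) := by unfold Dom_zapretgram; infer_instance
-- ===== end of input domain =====

-- B replaces A's row×row×column scan with list membership by a per-column char→rows index
-- plus per-row partner sets, sorted at the end (faster mechanism: no inner list scan).

-- ===== PORT A =====
-- the k-loop with its break: returns true iff some column k yields a forbidden bigram
def pvKBreak (lett_T : List String) (list : List String) (i j : Int) : List Int → Bool
  | [] => false
  | k :: ks =>
      let bigram := String.ofList [PySem.List.pyGetD (PySem.List.pyGetD lett_T i "").toList k ' ',
                               PySem.List.pyGetD (PySem.List.pyGetD lett_T j "").toList k ' ']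
      if list.contains bigram then true else pvKBreak lett_T list i j ks

def zapretgram (lett_T : List String) (list : List String) : List (Int × List Int) :=
  (PySem.List.pyRange 0 lett_T.length 1).map (fun i =>
    (i, (PySem.List.pyRange 0 lett_T.length 1).foldl (fun acc j =>
          if i ≠ j then
            if pvKBreak lett_T list i j
                 (PySem.List.pyRange 0 ((PySem.List.pyGetD lett_T 0 "").toList.length : Int) 1)
            then acc ++ [j] else acc
          else acc) []))

-- ===== PORT B =====
-- partners[i].add(j)  (pySetD is the identity when i is out of range; all callers use in-range i)
def pvAddPartner (P : List (PySem.Set Int)) (i j : Int) : List (PySem.Set Int) :=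
  PySem.List.pySetD P i (PySem.Set.add (PySem.List.pyGetD P i PySem.Set.empty) j)

-- the 'for i in range(n): col_index.setdefault(lett_T[i][k], []).append(i)' loop
def pvColIndex (lett_T : List String) (n k : Int) : PySem.Dict Char (List Int) :=
  (PySem.List.pyRange 0 n 1).foldl (fun d i =>
    d.modify (PySem.List.pyGetD (PySem.List.pyGetD lett_T i "").toList k ' ') [] (· ++ [i]))
    PySem.Dict.empty

-- the two inner 'for i in …: for j in …: if i != j: partners[i].add(j)' loops
def pvUpdateRows (is js : List Int) (P : List (PySem.Set Int)) : List (PySem.Set Int) :=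
  is.foldl (fun P i => js.foldl (fun P j => if i ≠ j then pvAddPartner P i j else P) P) P

def zapretgram_alt (lett_T : List String) (list : List String) : List (Int × List Int) :=
  let n : Int := lett_T.length
  let partners0 : List (PySem.Set Int) := (PySem.List.pyRange 0 n 1).map (fun _ => PySem.Set.empty)
  let partners : List (PySem.Set Int) :=
    if 2 ≤ n then
      let m : Int := ((PySem.List.pyGetD lett_T 0 "").toList.length : Int)
      let forb : PySem.Set String := PySem.Set.ofList (list.filter (fun b => b.toList.length == 2))
      (PySem.List.pyRange 0 m 1).foldl (fun P k =>
        let colIndex := pvColIndex lett_T n k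
        forb.foldl (fun P b =>
          pvUpdateRows (colIndex.getD (PySem.List.pyGetD b.toList 0 ' ') [])
                       (colIndex.getD (PySem.List.pyGetD b.toList 1 ' ') []) P) P) partners0
    else partners0
  (PySem.List.pyRange 0 n 1).map (fun i =>
    (i, PySem.List.sorted (PySem.List.pyGetD partners i PySem.Set.empty) (fun x => x) false))

-- ===== PRECONDITION & SPEC =====
-- Pre_ excludes ragged tables (some row shorter than row 0, when there are ≥ 2 rows): there A
-- raises IndexError unless an earlier forbidden bigram's break happens to skip the bad index,
-- an accident of scan order; B raises IndexError on all such tables.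
def Pre_zapretgram (lett_T : List String) (list : List String) : Prop :=
  lett_T.length < 2 ∨ ∀ s ∈ lett_T, (lett_T.headD "").toList.length ≤ s.toList.length
instance (lett_T : List String) (list : List String) : Decidable (Pre_zapretgram lett_T list) := by
  unfold Pre_zapretgram; infer_instance

def pvWitness_zapretgram : List String × List String := (["ab", "ba"], ["aa", "bb"])

def Spec_zapretgram (lett_T : List String) (list : List String) (out : List (Int × List Int)) : Prop := out = zapretgram_alt lett_T list
instance (lett_T : List String) (list : List String) (out : List (Int × List Int)) : Decidable (Spec_zapretgram lett_T list out) := by unfold Spec_zapretgram; infer_instance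

-- ===== CLAIM (what is proved, stated in full; the proofs are below) =====
def Claim_equal_zapretgram : Prop := ∀ (lett_T : List String) (list : List String), Dom_zapretgram lett_T list → Pre_zapretgram lett_T list → Spec_zapretgram lett_T list (zapretgram lett_T list)

-- ===== LEMMAS AND PROOFS =====

-- character of row i at column k (the shared defaulted access both ports perform)
def pvCh (lett_T : List String) (i k : Int) : Char :=
  PySem.List.pyGetD (PySem.List.pyGetD lett_T i "").toList k ' '

def pvHit (lett_T : List String) (list : List String) (i j k : Int) : Bool :=
  list.contains (String.ofList [pvCh lett_T i k, pvCh lett_T j k])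

def pvMatch (lett_T : List String) (list : List String) (i j : Int) : Bool :=
  (i != j) && (PySem.List.pyRange 0 ((PySem.List.pyGetD lett_T 0 "").toList.length : Int) 1).any
                (fun k => pvHit lett_T list i j k)

def pvCanon (lett_T : List String) (list : List String) : List (Int × List Int) :=
  (PySem.List.pyRange 0 lett_T.length 1).map (fun i =>
    (i, (PySem.List.pyRange 0 lett_T.length 1).filter (fun j => pvMatch lett_T list i j)))

lemma pvKBreak_eq_any (T L : List String) (i j : Int) (ks : List Int) :
    pvKBreak T L i j ks = ks.any (fun k => pvHit T L i j k) := by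
  induction ks with
  | nil => rfl
  | cons k ks ih =>
      simp only [pvKBreak, List.any_cons, ih, pvHit, pvCh, List.contains_eq_mem]
      split <;> simp_all

lemma pvFoldA (T L : List String) (i : Int) (xs : List Int) (acc : List Int) :
    xs.foldl (fun a j =>
        if i ≠ j then
          if pvKBreak T L i j
               (PySem.List.pyRange 0 ((PySem.List.pyGetD T 0 "").toList.length : Int) 1)
          then a ++ [j] else a
        else a) acc
      = acc ++ xs.filter (fun j => pvMatch T L i j) := by
  induction xs generalizing acc with
  | nil => simp
  | cons x xs ih =>
      rw [List.foldl_cons, ih, List.filter_cons]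
      have hstep : (if i ≠ x then
            if pvKBreak T L i x
                 (PySem.List.pyRange 0 ((PySem.List.pyGetD T 0 "").toList.length : Int) 1)
            then acc ++ [x] else acc
          else acc)
          = acc ++ (if pvMatch T L i x = true then [x] else []) := by
        unfold pvMatch
        rw [pvKBreak_eq_any]
        by_cases h : i = x
        · simp [h]
        · simp only [ne_eq, h, not_false_eq_true, if_true]
          split <;> simp_all
      rw [hstep, List.append_assoc]
      congr 1
      split <;> simp

lemma pvA_eq_canon (T L : List String) : zapretgram T L = pvCanon T L := by
  unfold zapretgram pvCanon
  refine List.map_congr_left (fun i _ => ?_)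
  rw [pvFoldA]
  simp

def pvSlot (P : List (PySem.Set Int)) (p : Int) : PySem.Set Int :=
  PySem.List.pyGetD P p PySem.Set.empty

lemma slot_pvAddPartner (P : List (PySem.Set Int)) (i j p : Int)
    (h0 : 0 ≤ i) (hl : i < (P.length : Int)) (hp : 0 ≤ p) :
    pvSlot (pvAddPartner P i j) p
      = if p = i then PySem.Set.add (pvSlot P i) j else pvSlot P p := by
  unfold pvSlot pvAddPartner
  have hi : i = ((i.toNat : Nat) : Int) := by omega
  have hp2 : p = ((p.toNat : Nat) : Int) := by omega
  rw [hi, hp2, PySem.List.pyGetD_pySetD_natCast _ _ _ _ _ (by omega)]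
  by_cases h : p.toNat = i.toNat
  · rw [if_pos h, if_pos (show ((p.toNat : Nat) : Int) = ((i.toNat : Nat) : Int) by exact_mod_cast h)]
  · rw [if_neg h, if_neg (show ¬(((p.toNat : Nat) : Int) = ((i.toNat : Nat) : Int)) from
      fun hc => h (by exact_mod_cast hc))]

lemma length_pvAddPartner (P : List (PySem.Set Int)) (i j : Int)
    (h0 : 0 ≤ i) (hl : i < (P.length : Int)) :
    (pvAddPartner P i j).length = P.length := by
  unfold pvAddPartner PySem.List.pySetD
  have hi : i = ((i.toNat : Nat) : Int) := by omega
  rw [hi, PySem.List.pySet?_natCast _ _ _ (by omega)]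
  simp

lemma pvJ (i : Int) (js : List Int) (P : List (PySem.Set Int))
    (h0 : 0 ≤ i) (hl : i < (P.length : Int)) :
    (js.foldl (fun P j => if i ≠ j then pvAddPartner P i j else P) P).length = P.length ∧
    ∀ p, 0 ≤ p →
      pvSlot (js.foldl (fun P j => if i ≠ j then pvAddPartner P i j else P) P) p
        = if p = i then PySem.Set.update (pvSlot P i) (js.filter (fun j => decide (i ≠ j)))
          else pvSlot P p := by
  induction js generalizing P with
  | nil =>
      refine ⟨rfl, fun p hp => ?_⟩
      simp only [List.foldl_nil, List.filter_nil, PySem.Set.update_nil]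
      split
      · rename_i h; rw [h]
      · rfl
  | cons j js ih =>
      by_cases hij : i = j
      · simp only [List.foldl_cons]
        rw [if_neg (by simp [hij])]
        obtain ⟨h1, h2⟩ := ih P hl
        refine ⟨h1, fun p hp => ?_⟩
        rw [h2 p hp, List.filter_cons]
        simp [hij]
      · simp only [List.foldl_cons]
        rw [if_pos hij]
        have hlen := length_pvAddPartner P i j h0 hl
        obtain ⟨h1, h2⟩ := ih (pvAddPartner P i j) (by rw [hlen]; exact hl)
        refine ⟨h1.trans hlen, fun p hp => ?_⟩
        rw [h2 p hp]
        by_cases hpi : p = i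
        · rw [if_pos hpi, if_pos hpi, slot_pvAddPartner P i j i h0 hl h0, if_pos rfl,
            List.filter_cons, if_pos (by simp [hij]), PySem.Set.update_cons]
        · rw [if_neg hpi, if_neg hpi, slot_pvAddPartner P i j p h0 hl hp, if_neg hpi]

lemma pvM (js is : List Int) (P : List (PySem.Set Int))
    (his : ∀ i ∈ is, 0 ≤ i ∧ i < (P.length : Int)) :
    (pvUpdateRows is js P).length = P.length ∧
    (∀ p x, 0 ≤ p → (x ∈ pvSlot (pvUpdateRows is js P) p ↔
        x ∈ pvSlot P p ∨ (p ∈ is ∧ x ∈ js ∧ x ≠ p))) ∧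
    ((∀ q, 0 ≤ q → (pvSlot P q).Nodup) →
      ∀ q, 0 ≤ q → (pvSlot (pvUpdateRows is js P) q).Nodup) := by
  induction is generalizing P with
  | nil =>
      exact ⟨rfl, fun p x hp => by simp [pvUpdateRows], fun h q hq => h q hq⟩
  | cons i is ih =>
      obtain ⟨hi0, hil⟩ := his i (List.mem_cons_self ..)
      obtain ⟨hJ1, hJ2⟩ := pvJ i js P hi0 hil
      have his' : ∀ i' ∈ is, 0 ≤ i' ∧ i' < (((js.foldl (fun P j => if i ≠ j then pvAddPartner P i j else P) P)).length : Int) := by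
        intro i' hi'
        rw [hJ1]
        exact his i' (List.mem_cons_of_mem _ hi')
      obtain ⟨g1, g2, g3⟩ := ih (js.foldl (fun P j => if i ≠ j then pvAddPartner P i j else P) P) his'
      refine ⟨?_, fun p x hp => ?_, fun hnd q hq => ?_⟩
      · rw [pvUpdateRows, List.foldl_cons, ← pvUpdateRows]
        exact g1.trans hJ1
      · rw [pvUpdateRows, List.foldl_cons, ← pvUpdateRows, g2 p x hp, hJ2 p hp]
        by_cases hpi : p = i
        · rw [if_pos hpi, hpi]
          simp only [PySem.Set.mem_update, List.mem_filter, decide_eq_true_eq, List.mem_cons]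
          constructor
          · rintro ((h | ⟨h1, h2⟩) | ⟨h1, h2, h3⟩)
            · exact Or.inl h
            · exact Or.inr ⟨Or.inl trivial, h1, fun hc => h2 hc.symm⟩
            · exact Or.inr ⟨Or.inr h1, h2, h3⟩
          · rintro (h | ⟨(h1 | h1), h2, h3⟩)
            · exact Or.inl (Or.inl h)
            · exact Or.inl (Or.inr ⟨h2, fun hc => h3 hc.symm⟩)
            · exact Or.inr ⟨h1, h2, h3⟩
        · rw [if_neg hpi]
          simp only [List.mem_cons]
          constructor
          · rintro (h | ⟨h1, h2, h3⟩)
            · exact Or.inl h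
            · exact Or.inr ⟨Or.inr h1, h2, h3⟩
          · rintro (h | ⟨(h1 | h1), h2, h3⟩)
            · exact Or.inl h
            · exact absurd h1 hpi
            · exact Or.inr ⟨h1, h2, h3⟩
      · rw [pvUpdateRows, List.foldl_cons, ← pvUpdateRows]
        refine g3 (fun q' hq' => ?_) q hq
        rw [hJ2 q' hq']
        split
        · exact PySem.Set.nodup_update _ _ (hnd i hi0)
        · exact hnd q' hq'

lemma pvF (r0 r1 : String → List Int) (bs : List String) (P : List (PySem.Set Int))
    (hr : ∀ b ∈ bs, ∀ i ∈ r0 b, 0 ≤ i ∧ i < (P.length : Int)) :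
    ((bs.foldl (fun P b => pvUpdateRows (r0 b) (r1 b) P) P).length = P.length) ∧
    (∀ p x, 0 ≤ p → (x ∈ pvSlot (bs.foldl (fun P b => pvUpdateRows (r0 b) (r1 b) P) P) p ↔
        x ∈ pvSlot P p ∨ ∃ b ∈ bs, p ∈ r0 b ∧ x ∈ r1 b ∧ x ≠ p)) ∧
    ((∀ q, 0 ≤ q → (pvSlot P q).Nodup) →
      ∀ q, 0 ≤ q → (pvSlot (bs.foldl (fun P b => pvUpdateRows (r0 b) (r1 b) P) P) q).Nodup) := by
  induction bs generalizing P with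
  | nil => exact ⟨rfl, fun p x hp => by simp, fun h q hq => h q hq⟩
  | cons b bs ih =>
      obtain ⟨m1, m2, m3⟩ := pvM (r1 b) (r0 b) P (hr b (List.mem_cons_self ..))
      have hr' : ∀ b' ∈ bs, ∀ i ∈ r0 b', 0 ≤ i ∧ i < ((pvUpdateRows (r0 b) (r1 b) P).length : Int) := by
        intro b' hb' i hi
        rw [m1]
        exact hr b' (List.mem_cons_of_mem _ hb') i hi
      obtain ⟨g1, g2, g3⟩ := ih (pvUpdateRows (r0 b) (r1 b) P) hr'
      refine ⟨(List.foldl_cons .. ▸ g1).trans m1, fun p x hp => ?_, fun hnd q hq => ?_⟩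
      · rw [List.foldl_cons, g2 p x hp, m2 p x hp]
        simp only [List.mem_cons]
        constructor
        · rintro ((h | ⟨h1, h2, h3⟩) | ⟨b', h1, h2, h3, h4⟩)
          · exact Or.inl h
          · exact Or.inr ⟨b, Or.inl rfl, h1, h2, h3⟩
          · exact Or.inr ⟨b', Or.inr h1, h2, h3, h4⟩
        · rintro (h | ⟨b', (h1 | h1), h2, h3, h4⟩)
          · exact Or.inl (Or.inl h)
          · exact Or.inl (Or.inr (h1 ▸ ⟨h2, h3, h4⟩))
          · exact Or.inr ⟨b', h1, h2, h3, h4⟩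
      · rw [List.foldl_cons]
        exact g3 (m3 hnd) q hq

lemma pvK (R0 R1 : Int → String → List Int) (bs : List String) (ks : List Int)
    (P : List (PySem.Set Int))
    (hr : ∀ k ∈ ks, ∀ b ∈ bs, ∀ i ∈ R0 k b, 0 ≤ i ∧ i < (P.length : Int)) :
    ((ks.foldl (fun P k => bs.foldl (fun P b => pvUpdateRows (R0 k b) (R1 k b) P) P) P).length
        = P.length) ∧
    (∀ p x, 0 ≤ p → (x ∈ pvSlot (ks.foldl (fun P k => bs.foldl (fun P b => pvUpdateRows (R0 k b) (R1 k b) P) P) P) p ↔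
        x ∈ pvSlot P p ∨ ∃ k ∈ ks, ∃ b ∈ bs, p ∈ R0 k b ∧ x ∈ R1 k b ∧ x ≠ p)) ∧
    ((∀ q, 0 ≤ q → (pvSlot P q).Nodup) →
      ∀ q, 0 ≤ q → (pvSlot (ks.foldl (fun P k => bs.foldl (fun P b => pvUpdateRows (R0 k b) (R1 k b) P) P) P) q).Nodup) := by
  induction ks generalizing P with
  | nil => exact ⟨rfl, fun p x hp => by simp, fun h q hq => h q hq⟩
  | cons k ks ih =>
      obtain ⟨f1, f2, f3⟩ := pvF (R0 k) (R1 k) bs P (hr k (List.mem_cons_self ..))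
      have hr' : ∀ k' ∈ ks, ∀ b ∈ bs, ∀ i ∈ R0 k' b,
          0 ≤ i ∧ i < ((bs.foldl (fun P b => pvUpdateRows (R0 k b) (R1 k b) P) P).length : Int) := by
        intro k' hk' b hb i hi
        rw [f1]
        exact hr k' (List.mem_cons_of_mem _ hk') b hb i hi
      obtain ⟨g1, g2, g3⟩ := ih (bs.foldl (fun P b => pvUpdateRows (R0 k b) (R1 k b) P) P) hr'
      refine ⟨(List.foldl_cons .. ▸ g1).trans f1, fun p x hp => ?_, fun hnd q hq => ?_⟩
      · rw [List.foldl_cons, g2 p x hp, f2 p x hp]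
        simp only [List.mem_cons]
        constructor
        · rintro ((h | ⟨b, h1, h2, h3, h4⟩) | ⟨k', h1, h2⟩)
          · exact Or.inl h
          · exact Or.inr ⟨k, Or.inl rfl, b, h1, h2, h3, h4⟩
          · exact Or.inr ⟨k', Or.inr h1, h2⟩
        · rintro (h | ⟨k', (h1 | h1), h2⟩)
          · exact Or.inl (Or.inl h)
          · exact Or.inl (Or.inr (h1 ▸ h2))
          · exact Or.inr ⟨k', h1, h2⟩
      · rw [List.foldl_cons]
        exact g3 (f3 hnd) q hq

lemma pvColIndex_getD (T : List String) (n k : Int) (c : Char) :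
    (pvColIndex T n k).getD c []
      = (PySem.List.pyRange 0 n 1).filter (fun i => pvCh T i k == c) := by
  have h : ((PySem.List.pyRange 0 n 1).map (fun i => (pvCh T i k, i))).foldl
        (fun d p => d.modify p.1 [] (· ++ [p.2])) PySem.Dict.empty
      = (PySem.List.pyRange 0 n 1).foldl (fun d i =>
          d.modify (PySem.List.pyGetD (PySem.List.pyGetD T i "").toList k ' ') [] (· ++ [i]))
          PySem.Dict.empty := by
    rw [List.foldl_map]
    rfl
  rw [pvColIndex, ← h, PySem.Dict.getD_foldl_modify_append, PySem.Dict.getD_empty]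
  simp only [List.filter_map, List.map_map, List.nil_append]
  have : ((fun p => p.1 == c) ∘ fun i => (pvCh T i k, i)) = fun i => pvCh T i k == c := rfl
  rw [this]
  exact List.map_id _ ▸ rfl

lemma pvList_len2 {α : Type} (l : List α) (h : l.length = 2) : ∃ a c, l = [a, c] := by
  match l, h with
  | [a, c], _ => exact ⟨a, c, rfl⟩

lemma pvSlot_partners0 (n q : Int) (hq : 0 ≤ q) :
    PySem.List.pyGetD ((PySem.List.pyRange 0 n 1).map
        (fun _ => (PySem.Set.empty : PySem.Set Int))) q PySem.Set.empty
      = (PySem.Set.empty : PySem.Set Int) := by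
  by_cases h : q < n
  · exact PySem.List.pyGetD_map_pyRange_of_nonneg _ n q _ hq h
  · apply PySem.List.pyGetD_of_none
    rw [PySem.List.pyGet?_eq_none_iff]
    intro hc
    obtain ⟨h1, h2⟩ := hc
    rw [List.length_map, PySem.List.length_pyRange_one] at h2
    omega

lemma pvB_eq_canon (T L : List String) : zapretgram_alt T L = pvCanon T L := by
  unfold zapretgram_alt pvCanon
  simp only []
  by_cases h2 : 2 ≤ (T.length : Int)
  · rw [if_pos h2]
    refine List.map_congr_left (fun i hi => ?_)
    obtain ⟨hi0, hin⟩ := PySem.List.mem_pyRange_one.mp hi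
    refine congrArg (Prod.mk i) ?_
    have hr : ∀ k ∈ PySem.List.pyRange 0 ((PySem.List.pyGetD T 0 "").toList.length : Int) 1,
        ∀ b ∈ PySem.Set.ofList (L.filter (fun b => b.toList.length == 2)),
        ∀ i' ∈ (pvColIndex T (T.length : Int) k).getD (PySem.List.pyGetD b.toList 0 ' ') [],
        0 ≤ i' ∧ i' < ((((PySem.List.pyRange 0 (T.length : Int) 1).map
            (fun _ => (PySem.Set.empty : PySem.Set Int))).length : Int)) := by
      intro k _ b _ i' hi'
      rw [pvColIndex_getD] at hi'
      obtain ⟨hmem, _⟩ := List.mem_filter.mp hi'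
      obtain ⟨a1, a2⟩ := PySem.List.mem_pyRange_one.mp hmem
      refine ⟨a1, ?_⟩
      rw [List.length_map, PySem.List.length_pyRange_one]
      omega
    obtain ⟨K1, K2, K3⟩ := pvK
      (fun k b => (pvColIndex T (T.length : Int) k).getD (PySem.List.pyGetD b.toList 0 ' ') [])
      (fun k b => (pvColIndex T (T.length : Int) k).getD (PySem.List.pyGetD b.toList 1 ' ') [])
      (PySem.Set.ofList (L.filter (fun b => b.toList.length == 2)))
      (PySem.List.pyRange 0 ((PySem.List.pyGetD T 0 "").toList.length : Int) 1)
      ((PySem.List.pyRange 0 (T.length : Int) 1).map (fun _ => PySem.Set.empty)) hr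
    have hbase : ∀ q, 0 ≤ q →
        (pvSlot ((PySem.List.pyRange 0 (T.length : Int) 1).map (fun _ => PySem.Set.empty)) q).Nodup := by
      intro q hq
      unfold pvSlot
      rw [pvSlot_partners0 _ q hq]
      exact List.nodup_nil
    have hndS := K3 hbase i hi0
    unfold pvSlot at hndS
    have hmem : ∀ x,
        x ∈ pvSlot ((PySem.List.pyRange 0 ((PySem.List.pyGetD T 0 "").toList.length : Int) 1).foldl
          (fun P k => (PySem.Set.ofList (L.filter (fun b => b.toList.length == 2))).foldl
            (fun P b => pvUpdateRows
              ((pvColIndex T (T.length : Int) k).getD (PySem.List.pyGetD b.toList 0 ' ') [])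
              ((pvColIndex T (T.length : Int) k).getD (PySem.List.pyGetD b.toList 1 ' ') []) P) P)
          ((PySem.List.pyRange 0 (T.length : Int) 1).map (fun _ => PySem.Set.empty))) i ↔
        x ∈ PySem.List.pyRange 0 (T.length : Int) 1 ∧ pvMatch T L i x = true := by
      intro x
      have raw := K2 i x hi0
      rw [raw]
      unfold pvSlot
      rw [pvSlot_partners0 _ i hi0]
      constructor
      · rintro (h | ⟨k, hk, b, hb, hiR, hxR, hxi⟩)
        · exact absurd h (List.not_mem_nil)
        · rw [pvColIndex_getD] at hiR hxR
          obtain ⟨hiRange, hchI⟩ := List.mem_filter.mp hiR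
          obtain ⟨hxRange, hchX⟩ := List.mem_filter.mp hxR
          obtain ⟨hbL, hb2⟩ := List.mem_filter.mp ((PySem.Set.mem_ofList _ _).mp hb)
          obtain ⟨a, c, hbl⟩ := pvList_len2 b.toList (by exact beq_iff_eq.mp hb2)
          have ha : PySem.List.pyGetD b.toList 0 ' ' = a := by rw [hbl]; rfl
          have hc : PySem.List.pyGetD b.toList 1 ' ' = c := by rw [hbl]; rfl
          refine ⟨hxRange, ?_⟩
          unfold pvMatch
          rw [Bool.and_eq_true]
          refine ⟨by simpa using fun hc' => hxi hc'.symm, ?_⟩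
          rw [List.any_eq_true]
          refine ⟨k, hk, ?_⟩
          unfold pvHit
          have hbeq : String.ofList [pvCh T i k, pvCh T x k] = b := by
            rw [beq_iff_eq] at hchI hchX
            rw [hchI, hchX, ha, hc, ← hbl, String.ofList_toList]
          rw [hbeq, List.contains_eq_mem]
          exact decide_eq_true hbL
      · rintro ⟨hxRange, hmatch⟩
        unfold pvMatch at hmatch
        rw [Bool.and_eq_true, List.any_eq_true] at hmatch
        obtain ⟨hne, k, hk, hhit⟩ := hmatch
        unfold pvHit at hhit
        rw [List.contains_eq_mem, decide_eq_true_eq] at hhit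
        refine Or.inr ⟨k, hk, String.ofList [pvCh T i k, pvCh T x k], ?_, ?_, ?_, ?_⟩
        · exact (PySem.Set.mem_ofList _ _).mpr (List.mem_filter.mpr ⟨hhit, by simp⟩)
        · rw [pvColIndex_getD]
          refine List.mem_filter.mpr ⟨PySem.List.mem_pyRange_one.mpr ⟨hi0, hin⟩, ?_⟩
          simp
        · rw [pvColIndex_getD]
          refine List.mem_filter.mpr ⟨hxRange, ?_⟩
          simp
          rfl
        · rw [bne_iff_ne] at hne
          exact fun hc => hne hc.symm
    apply PySem.List.sorted_eq_of_perm_of_pairwise_lt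
    · rw [List.perm_ext_iff_of_nodup (List.Nodup.filter _ (PySem.List.nodup_pyRange_one 0 _)) hndS]
      intro a
      rw [List.mem_filter]
      exact ((hmem a).trans (Iff.rfl)).symm
    · exact (PySem.List.pairwise_lt_pyRange_one 0 _).filter _
  · rw [if_neg h2]
    refine List.map_congr_left (fun i hi => ?_)
    obtain ⟨hi0, hin⟩ := PySem.List.mem_pyRange_one.mp hi
    refine congrArg (Prod.mk i) ?_
    rw [pvSlot_partners0 (T.length : Int) i hi0]
    have hfil : (PySem.List.pyRange 0 (T.length : Int) 1).filter (fun j => pvMatch T L i j) = [] := by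
      refine List.filter_eq_nil_iff.mpr (fun j hj hmatch => ?_)
      obtain ⟨hj0, hjn⟩ := PySem.List.mem_pyRange_one.mp hj
      have hij : i = j := by omega
      subst hij
      simp [pvMatch] at hmatch
    rw [hfil]
    rfl

-- ===== VERDICT (by name: the statement is the Claim_ definition above) =====
theorem zapretgram_spec : Claim_equal_zapretgram := by
  intro T L _ _
  unfold Spec_zapretgram
  rw [pvA_eq_canon, pvB_eq_canon]
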